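-- pv_equiv track=rewrite | github.com/arccoxx/topoKEMP | topoKEMP2/linear_solver.py | sort_and_reduce
-- ===== SOURCE A (Python) =====
-- from typing import Dict, List, Optional, Tuple, Set, FrozenSet
-- from collections import defaultdict, deque
--
-- def sort_and_reduce(braid_word: List[int]) -> List[int]:
--     """
--     Sort generators by strand index (preserving relative order for same/adjacent strands)
--     then reduce.
--
--     This is a form of canonical form computation.
--     Time: O(n log n) for sorting, but can be O(n) with counting sort
--     """
--     if not braid_word:
--         return []
--
--     buckets: Dict[int, List[Tuple[int, int]]] = defaultdict(list)
--     for i, gen in enumerate(braid_word):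
--         strand = abs(gen)
--         buckets[strand].append((i, gen))
--
--     result = []
--     for strand in sorted(buckets.keys()):
--         strand_gens = [g for _, g in buckets[strand]]
--
--         stack = []
--         for gen in strand_gens:
--             if stack and stack[-1] == -gen:
--                 stack.pop()
--             else:
--                 stack.append(gen)
--         result.extend(stack)
--
--     return result
-- ===== SOURCE B (Python) =====
-- from typing import List
--
-- def sort_and_reduce(braid_word: List[int]) -> List[int]:
--     """Stable-sort by strand (abs), then one stack-cancellation pass.
--
--     Same-strand generators stay in original order (stable sort), and a
--     generator can only cancel against its own strand's neighbours, so a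
--     single pass over the sorted word reduces every strand bucket at once.
--     """
--     stack: List[int] = []
--     for gen in sorted(braid_word, key=abs):
--         if stack and stack[-1] == -gen:
--             stack.pop()
--         else:
--             stack.append(gen)
--     return stack
-- ===== Notes on version B (the rewrite author's own statement) =====
-- stated objective: simpler
-- what changed: Replaced the bucket dictionary plus per-bucket cancellation loops by a single stable sort keyed on abs followed by one stack-cancellation pass over the sorted word.
import Mathlib
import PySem

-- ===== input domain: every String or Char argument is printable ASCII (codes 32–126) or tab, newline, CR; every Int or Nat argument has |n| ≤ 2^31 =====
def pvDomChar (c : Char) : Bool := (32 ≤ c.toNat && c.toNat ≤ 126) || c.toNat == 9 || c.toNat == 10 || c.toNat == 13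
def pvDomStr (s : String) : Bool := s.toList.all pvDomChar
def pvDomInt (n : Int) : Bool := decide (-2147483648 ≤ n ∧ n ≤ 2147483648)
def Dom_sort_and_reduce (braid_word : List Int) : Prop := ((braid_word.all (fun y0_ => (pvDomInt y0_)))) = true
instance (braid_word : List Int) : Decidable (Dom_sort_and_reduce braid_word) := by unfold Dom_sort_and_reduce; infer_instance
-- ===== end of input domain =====

-- B replaces A's bucket dictionary + per-bucket cancellation loops by one stable sort keyed on
-- abs followed by a single stack-cancellation pass (objective: simpler; equal output proved).

-- ===== PORT A =====
-- the inner reduction step, verbatim in both Pythons: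
-- 'if stack and stack[-1] == -gen: stack.pop() else: stack.append(gen)'
-- (stack.getLast? = some (-gen) is exactly 'stack and stack[-1] == -gen'; getLast? is none on [])
def pvCancelStep (stack : List Int) (gen : Int) : List Int :=
  if stack.getLast? = some (-gen) then stack.dropLast else stack ++ [gen]

def sort_and_reduce (braid_word : List Int) : List Int :=
  if braid_word = [] then []
  else
    -- buckets = defaultdict(list); for i, gen in enumerate(braid_word): buckets[abs(gen)].append((i, gen))
    let buckets : PySem.Dict Int (List (Int × Int)) :=
      (PySem.List.enumerate braid_word).foldl
        (fun d p => PySem.Dict.insert d |p.2| (PySem.Dict.getD d |p.2| [] ++ [p]))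
        PySem.Dict.empty
    -- result = []; for strand in sorted(buckets.keys()): strand_gens = …; stack-loop; result.extend(stack)
    (PySem.List.sorted (PySem.Dict.keys buckets) (fun k => k)).foldl
      (fun result strand =>
        let strand_gens := (PySem.Dict.getD buckets strand []).map (fun p => p.2)
        let stack := strand_gens.foldl pvCancelStep []
        result ++ stack)
      []

-- ===== PORT B =====
-- stack = []; for gen in sorted(braid_word, key=abs): stack-loop; return stack
def sort_and_reduce_alt (braid_word : List Int) : List Int :=
  (PySem.List.sorted braid_word (fun g => |g|)).foldl pvCancelStep []

-- ===== PRECONDITION & SPEC =====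
def Spec_sort_and_reduce (braid_word : List Int) (out : List Int) : Prop := out = sort_and_reduce_alt braid_word
instance (braid_word : List Int) (out : List Int) : Decidable (Spec_sort_and_reduce braid_word out) := by unfold Spec_sort_and_reduce; infer_instance

-- ===== CLAIM (what is proved, stated in full; the proofs are below) =====
def Claim_equal_sort_and_reduce : Prop := ∀ (braid_word : List Int), Dom_sort_and_reduce braid_word → Spec_sort_and_reduce braid_word (sort_and_reduce braid_word)

-- ===== LEMMAS AND PROOFS =====

-- ---- dictionary construction (A side) ----

lemma pv_keys_insert (d : PySem.Dict Int (List (Int × Int))) (k : Int) (v : List (Int × Int)) :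
    (PySem.Dict.insert d k v).keys = PySem.Set.add d.keys k := by
  unfold PySem.Dict.insert PySem.Set.add
  have hc : PySem.Set.contains d.keys k = PySem.Dict.contains d k := by
    simp [PySem.Set.contains, PySem.Dict.contains, PySem.Dict.keys, List.any_eq, List.mem_map]
  rw [hc]
  cases h : PySem.Dict.contains d k with
  | false => simp [PySem.Dict.keys]
  | true =>
    simp [PySem.Dict.keys]
    intro a b hab
    split_ifs with hak
    · exact hak.symm
    · rfl

lemma pv_getD_build (l : List (Int × Int)) (d : PySem.Dict Int (List (Int × Int))) (a : Int) :
    (l.foldl (fun d p => PySem.Dict.insert d |p.2| (PySem.Dict.getD d |p.2| [] ++ [p])) d).getD a []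
      = d.getD a [] ++ l.filter (fun p => |p.2| == a) := by
  induction l generalizing d with
  | nil => simp
  | cons p l ih =>
    simp only [List.foldl_cons, ih, List.filter_cons]
    rw [PySem.Dict.getD_insert]
    by_cases hk : a = |p.2|
    · simp [hk]
    · have : (|p.2| == a) = false := by simp [Ne.symm hk]
      simp [hk, this]

lemma pv_keys_build (l : List (Int × Int)) (d : PySem.Dict Int (List (Int × Int))) :
    (l.foldl (fun d p => PySem.Dict.insert d |p.2| (PySem.Dict.getD d |p.2| [] ++ [p])) d).keys
      = (l.map (fun p => |p.2|)).foldl PySem.Set.add d.keys := by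
  induction l generalizing d with
  | nil => simp
  | cons p l ih => simp only [List.foldl_cons, List.map_cons, ih, pv_keys_insert]

lemma pv_enum_map_snd (w : List Int) (s : Int) :
    (PySem.List.enumerate w s).map (fun p => |p.2|) = w.map (fun g => |g|) := by
  induction w generalizing s with
  | nil => simp [PySem.List.enumerate]
  | cons x t ih => simp [PySem.List.enumerate, ih]

lemma pv_enum_filter_snd (w : List Int) (s a : Int) :
    ((PySem.List.enumerate w s).filter (fun p => |p.2| == a)).map (fun p => p.2)
      = w.filter (fun g => |g| == a) := by
  induction w generalizing s with
  | nil => simp [PySem.List.enumerate]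
  | cons x t ih =>
    simp only [PySem.List.enumerate, List.filter_cons]
    by_cases hx : (|x| == a) = true
    · simp [hx, ih]
    · simp only [hx]; simpa using ih (s+1)

-- ---- insertBy (stable-sort insertion) facts ----

lemma pv_insertBy_append (before : Int → Int → Bool) (x : Int) (l1 l2 : List Int)
    (h : ∀ y ∈ l1, before x y = false) :
    PySem.List.insertBy before x (l1 ++ l2) = l1 ++ PySem.List.insertBy before x l2 := by
  induction l1 with
  | nil => simp
  | cons y t ih =>
    have hy : before x y = false := h y (by simp)
    simp only [List.cons_append, PySem.List.insertBy, hy]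
    simp only [Bool.false_eq_true, if_false]
    rw [show PySem.List.insertBy before x (t ++ l2) = t ++ PySem.List.insertBy before x l2 from
      ih (fun y hy => h y (by simp [hy]))]

lemma pv_insertBy_all_before (before : Int → Int → Bool) (x : Int) (l : List Int)
    (h : ∀ y ∈ l, before x y = true) :
    PySem.List.insertBy before x l = x :: l := by
  cases l with
  | nil => rfl
  | cons y t => simp [PySem.List.insertBy, h y (by simp)]

-- ---- splitting a strictly increasing list at a pivot ----

lemma pv_split_mem (l : List Int) (k : Int) (hp : l.Pairwise (· < ·)) (hk : k ∈ l) :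
    l = l.filter (fun a => decide (a < k)) ++ k :: l.filter (fun a => decide (k < a)) := by
  induction l with
  | nil => cases hk
  | cons a t ih =>
    have ha : ∀ b ∈ t, a < b := fun b hb => (List.pairwise_cons.mp hp).1 b hb
    have ht : t.Pairwise (· < ·) := (List.pairwise_cons.mp hp).2
    by_cases hak : a = k
    · subst hak
      have h1 : (t.filter (fun b => decide (b < a))) = [] :=
        List.filter_eq_nil_iff.mpr (fun b hb => by simpa using not_lt.mpr (le_of_lt (ha b hb)))
      have h2 : t.filter (fun b => decide (a < b)) = t :=
        List.filter_eq_self.mpr (fun b hb => by simpa using ha b hb)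
      simp [h1, h2]
    · have hkt : k ∈ t := by cases hk with | head => exact absurd rfl hak | tail _ h => exact h
      have hak' : a < k := ha k hkt
      have : ¬ (k < a) := not_lt.mpr (le_of_lt hak')
      simp only [List.filter_cons]
      simp [hak', this]
      exact ih ht hkt

lemma pv_split_not_mem (l : List Int) (k : Int) (hp : l.Pairwise (· < ·)) (hk : k ∉ l) :
    l = l.filter (fun a => decide (a < k)) ++ l.filter (fun a => decide (k < a)) := by
  induction l with
  | nil => rfl
  | cons a t ih =>
    have ha : ∀ b ∈ t, a < b := fun b hb => (List.pairwise_cons.mp hp).1 b hb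
    have ht : t.Pairwise (· < ·) := (List.pairwise_cons.mp hp).2
    have hak : a ≠ k := fun h => hk (h ▸ List.mem_cons_self ..)
    by_cases h1 : a < k
    · simp only [List.filter_cons]
      have : ¬ (k < a) := not_lt.mpr (le_of_lt h1)
      simp [h1, this]
      exact ih ht (fun h => hk (List.mem_cons_of_mem _ h))
    · have hka : k < a := lt_of_le_of_ne (not_lt.mp h1) (Ne.symm hak)
      have h2 : t.filter (fun b => decide (b < k)) = [] :=
        List.filter_eq_nil_iff.mpr (fun b hb => by simpa using not_lt.mpr (le_of_lt (lt_trans hka (ha b hb))))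
      have h3 : t.filter (fun b => decide (k < b)) = t :=
        List.filter_eq_self.mpr (fun b hb => by simpa using lt_trans hka (ha b hb))
      simp [h1, hka, h2, h3]

-- ---- the grouping lemma: the stable sort by abs is the concatenation of the strand buckets ----

lemma pv_group (w : List Int) :
    PySem.List.sorted w (fun g => |g|) =
      (PySem.List.sorted (PySem.Set.ofList (w.map (fun g => |g|))) (fun k => k)).flatMap
        (fun a => w.filter (fun g => |g| == a)) := by
  induction w using List.reverseRecOn with
  | nil => rfl
  | append_singleton xs x ih =>
    set k : Int := |x| with hkdef
    set K : List Int := PySem.Set.ofList (xs.map (fun g => |g|)) with hKdef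
    set ks : List Int := PySem.List.sorted K (fun k => k) with hksdef
    set L : List Int := ks.filter (fun a => decide (a < k)) with hLdef
    set R : List Int := ks.filter (fun a => decide (k < a)) with hRdef
    set gxs : Int → List Int := fun a => xs.filter (fun g => |g| == a) with hgxsdef
    have hks_pw : ks.Pairwise (· < ·) := PySem.List.sorted_ofList_pairwise_lt _
    have hmemL : ∀ a ∈ L, a < k := fun a ha => by
      have := List.mem_filter.mp ha; simpa using this.2
    have hmemR : ∀ a ∈ R, k < a := fun a ha => by
      have := List.mem_filter.mp ha; simpa using this.2
    have hgabs : ∀ (a y : Int), y ∈ gxs a → |y| = a := by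
      intro a y hy
      have := List.mem_filter.mp hy
      simpa using this.2
    -- the key set gains |x|
    have hK' : PySem.Set.ofList ((xs ++ [x]).map (fun g => |g|)) = PySem.Set.add K k := by
      rw [List.map_append, PySem.Set.ofList_eq_foldl, List.foldl_append, ← PySem.Set.ofList_eq_foldl]
      rfl
    -- the sorted key list becomes L ++ k :: R
    have hsplit : PySem.List.sorted (PySem.Set.add K k) (fun k => k) = L ++ k :: R := by
      by_cases hk : k ∈ K
      · have hadd : PySem.Set.add K k = K := by
          have hc : PySem.Set.contains K k = true := List.contains_iff_mem.mpr hk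
          simp [PySem.Set.add, PySem.Set.contains, hk]
        rw [hadd, ← hksdef, hLdef, hRdef]
        exact pv_split_mem ks k hks_pw ((PySem.List.mem_sorted _ _ _ _).mpr hk)
      · have hc : PySem.Set.contains K k = false := by
          rw [Bool.eq_false_iff]
          exact fun h => hk (List.contains_iff_mem.mp h)
        have hadd : PySem.Set.add K k = K ++ [k] := by
          simp [PySem.Set.add, PySem.Set.contains, hk]
        have hknotks : k ∉ ks := fun h => hk ((PySem.List.mem_sorted _ _ _ _).mp h)
        have hLR : ks = L ++ R := pv_split_not_mem ks k hks_pw hknotks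
        rw [hadd]
        apply PySem.List.sorted_eq_of_perm_of_pairwise_lt
        · refine List.Perm.trans List.perm_middle ?_
          rw [← hLR]
          exact ((PySem.List.sorted_perm K _ false).cons k).trans (List.perm_append_singleton k K).symm
        · rw [List.pairwise_append]
          refine ⟨hks_pw.filter _, ?_, ?_⟩
          · rw [List.pairwise_cons]
            exact ⟨hmemR, hks_pw.filter _⟩
          · intro a ha b hb
            rcases List.mem_cons.mp hb with rfl | hb
            · exact hmemL a ha
            · exact lt_trans (hmemL a ha) (hmemR b hb)
    -- the strand buckets of xs ++ [x]
    have hfilter : ∀ a : Int, (xs ++ [x]).filter (fun g => |g| == a)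
        = gxs a ++ (if (|x| == a) = true then [x] else []) := by
      intro a
      rw [List.filter_append, hgxsdef]
      congr 1
      cases h : (|x| == a) with
      | true => simp [h]
      | false => simp [h]
    have hgL : ∀ a ∈ L, (xs ++ [x]).filter (fun g => |g| == a) = gxs a := by
      intro a ha
      rw [hfilter a]
      have : (|x| == a) = false := by
        rw [Bool.eq_false_iff, ne_eq, beq_iff_eq, ← hkdef]
        exact fun h => absurd (h ▸ hmemL a ha) (lt_irrefl a)
      simp [this]
    have hgR : ∀ a ∈ R, (xs ++ [x]).filter (fun g => |g| == a) = gxs a := by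
      intro a ha
      rw [hfilter a]
      have : (|x| == a) = false := by
        rw [Bool.eq_false_iff, ne_eq, beq_iff_eq, ← hkdef]
        exact fun h => absurd (h ▸ hmemR a ha) (lt_irrefl a)
      simp [this]
    have hgk : (xs ++ [x]).filter (fun g => |g| == k) = gxs k ++ [x] := by
      rw [hfilter k]
      simp [hkdef]
    -- right-hand side in bucket form
    have hRHS : (L ++ k :: R).flatMap (fun a => (xs ++ [x]).filter (fun g => |g| == a))
        = L.flatMap gxs ++ ((gxs k ++ [x]) ++ R.flatMap gxs) := by
      rw [List.flatMap_append, List.flatMap_cons, List.flatMap_congr hgL, List.flatMap_congr hgR, hgk]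
    -- left-hand side: one stable insertion into the grouped list
    have hLHS : PySem.List.sorted (xs ++ [x]) (fun g => |g|)
        = PySem.List.insertBy (fun a b => decide (|a| < |b|)) x (ks.flatMap gxs) := by
      rw [PySem.List.sorted_eq_foldl_insertBy (xs ++ [x]), List.foldl_append,
          ← PySem.List.sorted_eq_foldl_insertBy xs, ih]
      simp only [List.foldl_cons, List.foldl_nil]
    have hbfL : ∀ y ∈ L.flatMap gxs ++ gxs k, (decide (|x| < |y|)) = false := by
      intro y hy
      rw [decide_eq_false_iff_not, not_lt, ← hkdef]
      rcases List.mem_append.mp hy with hy | hy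
      · rcases List.mem_flatMap.mp hy with ⟨a, ha, hya⟩
        rw [hgabs a y hya]
        exact le_of_lt (hmemL a ha)
      · rw [hgabs k y hy]
    have hbfR : ∀ y ∈ R.flatMap gxs, (decide (|x| < |y|)) = true := by
      intro y hy
      rw [decide_eq_true_iff, ← hkdef]
      rcases List.mem_flatMap.mp hy with ⟨a, ha, hya⟩
      rw [hgabs a y hya]
      exact hmemR a ha
    rw [hK', hsplit, hRHS, hLHS]
    by_cases hk : k ∈ K
    · have hksEq : ks = L ++ k :: R := by
        rw [hLdef, hRdef]
        exact pv_split_mem ks k hks_pw ((PySem.List.mem_sorted _ _ _ _).mpr hk)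
      rw [hksEq, List.flatMap_append, List.flatMap_cons, ← List.append_assoc,
          pv_insertBy_append _ _ _ _ hbfL, pv_insertBy_all_before _ _ _ hbfR]
      simp
    · have hknotks : k ∉ ks := fun h => hk ((PySem.List.mem_sorted _ _ _ _).mp h)
      have hksEq : ks = L ++ R := pv_split_not_mem ks k hks_pw hknotks
      have hgxsk : gxs k = [] := by
        rw [hgxsdef]
        refine List.filter_eq_nil_iff.mpr (fun g hg hgk' => hk ?_)
        rw [hKdef]
        rw [PySem.Set.mem_ofList]
        exact List.mem_map.mpr ⟨g, hg, by simpa using hgk'⟩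
      have hbfL' : ∀ y ∈ L.flatMap gxs, (decide (|x| < |y|)) = false :=
        fun y hy => hbfL y (List.mem_append.mpr (Or.inl hy))
      rw [hksEq, List.flatMap_append, pv_insertBy_append _ _ _ _ hbfL',
          pv_insertBy_all_before _ _ _ hbfR, hgxsk]
      simp

-- ---- cancellation-pass facts ----

lemma pv_step_mem (t : List Int) (a g : Int) (h : g ∈ pvCancelStep t a) : g ∈ t ∨ g = a := by
  unfold pvCancelStep at h
  split at h
  · exact Or.inl (List.mem_of_mem_dropLast h)
  · rcases List.mem_append.mp h with h | h
    · exact Or.inl h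
    · exact Or.inr (by simpa using h)

lemma pv_foldl_step_mem (l : List Int) (s : List Int) (g : Int)
    (h : g ∈ l.foldl pvCancelStep s) : g ∈ s ∨ g ∈ l := by
  induction l generalizing s with
  | nil => exact Or.inl h
  | cons a l ih =>
    rcases ih (pvCancelStep s a) h with h' | h'
    · rcases pv_step_mem s a g h' with h'' | h''
      · exact Or.inl h''
      · exact Or.inr (by simp [h''])
    · exact Or.inr (List.mem_cons_of_mem _ h')

lemma pv_step_shift (s t : List Int) (a : Int) (h : ∀ y ∈ s, |y| ≠ |a|) :
    pvCancelStep (s ++ t) a = s ++ pvCancelStep t a := by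
  unfold pvCancelStep
  cases t with
  | nil =>
    have : s.getLast? ≠ some (-a) := by
      intro hlast
      have hm : -a ∈ s := List.mem_of_getLast? hlast
      exact h (-a) hm (by simp)
    simp [this]
  | cons b t' =>
    rw [List.getLast?_append]
    have hne : (b :: t').getLast? ≠ none := by
      simp [List.getLast?_eq_none_iff]
    cases hl : (b :: t').getLast? with
    | none => exact absurd hl hne
    | some c =>
      by_cases hc : c = -a
      · subst hc
        simp
      · have h1 : (some c ≠ some (-a)) := by simpa using hc
        simp [h1, List.append_assoc]

lemma pv_foldl_shift (l s t : List Int)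
    (hl : ∀ y ∈ s, ∀ g ∈ l, |y| ≠ |g|) (ht : ∀ y ∈ s, ∀ g ∈ t, |y| ≠ |g|) :
    l.foldl pvCancelStep (s ++ t) = s ++ l.foldl pvCancelStep t := by
  induction l generalizing t with
  | nil => rfl
  | cons a l ih =>
    simp only [List.foldl_cons]
    rw [pv_step_shift s t a (fun y hy => hl y hy a (by simp))]
    exact ih (pvCancelStep t a) (fun y hy g hg => hl y hy g (List.mem_cons_of_mem _ hg))
      (fun y hy g hg => by
        rcases pv_step_mem t a g hg with h | h
        · exact ht y hy g h
        · exact h ▸ hl y hy a (by simp))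

lemma pv_dist (K : List Int) (g : Int → List Int)
    (hp : K.Pairwise (· < ·)) (hg : ∀ a ∈ K, ∀ y ∈ g a, |y| = a) :
    (K.flatMap g).foldl pvCancelStep [] = K.flatMap (fun a => (g a).foldl pvCancelStep []) := by
  induction K with
  | nil => rfl
  | cons a K ih =>
    have ha : ∀ b ∈ K, a < b := fun b hb => (List.pairwise_cons.mp hp).1 b hb
    simp only [List.flatMap_cons, List.foldl_append]
    have heq : ((g a).foldl pvCancelStep []) ++ [] = (g a).foldl pvCancelStep [] := by simp
    rw [show (g a).foldl pvCancelStep [] = ((g a).foldl pvCancelStep []) ++ [] from heq.symm]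
    rw [pv_foldl_shift]
    · rw [ih (List.pairwise_cons.mp hp).2 (fun b hb y hy => hg b (List.mem_cons_of_mem _ hb) y hy)]
      simp
    · intro y hy gg hgg
      have hya : |y| = a := by
        rcases pv_foldl_step_mem (g a) [] y (by simpa using hy) with h | h
        · cases h
        · exact hg a (by simp) y h
      rcases List.mem_flatMap.mp hgg with ⟨b, hb, hgb⟩
      have : |gg| = b := hg b (List.mem_cons_of_mem _ hb) gg hgb
      rw [hya, this]
      exact ne_of_lt (ha b hb)
    · intro y hy gg hgg
      cases hgg

-- ===== VERDICT (by name: the statement is the Claim_ definition above) =====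
theorem sort_and_reduce_spec : Claim_equal_sort_and_reduce := by
  intro w _
  unfold Spec_sort_and_reduce sort_and_reduce sort_and_reduce_alt
  by_cases hw : w = []
  · subst hw; rfl
  · simp only [if_neg hw]
    have hkeys :
        ((PySem.List.enumerate w).foldl
          (fun d p => PySem.Dict.insert d |p.2| (PySem.Dict.getD d |p.2| [] ++ [p]))
          PySem.Dict.empty).keys = PySem.Set.ofList (w.map (fun g => |g|)) := by
      rw [pv_keys_build, pv_enum_map_snd, PySem.Set.ofList_eq_foldl]
      rfl
    have hgetD : ∀ a : Int,
        (((PySem.List.enumerate w).foldl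
          (fun d p => PySem.Dict.insert d |p.2| (PySem.Dict.getD d |p.2| [] ++ [p]))
          PySem.Dict.empty).getD a []).map (fun p => p.2) = w.filter (fun g => |g| == a) := by
      intro a
      rw [pv_getD_build,
        show (PySem.Dict.empty : PySem.Dict Int (List (Int × Int))).getD a [] = [] from rfl,
        List.nil_append]
      exact pv_enum_filter_snd w 0 a
    rw [hkeys]
    rw [PySem.List.foldl_congr_mem _ _
      (fun result strand => result ++ (w.filter (fun g => |g| == strand)).foldl pvCancelStep []) _
      (by intro acc a _; rw [hgetD a])]
    rw [PySem.List.foldl_append_eq_flatMap, List.nil_append]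
    rw [pv_group w]
    rw [pv_dist]
    · exact PySem.List.sorted_ofList_pairwise_lt _
    · intro a _ y hy
      have := List.mem_filter.mp hy
      simpa using this.2
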